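-- pv_equiv track=rewrite | github.com/equinor/semeio | src/semeio/workflows/ahm_analysis/ahmanalysis.py | make_obs_groups
-- ===== SOURCE A (Python) =====
-- import itertools
--
-- def make_obs_groups(key_map):
--     """Create a mapping of observation groups, the names will be:
--     data_key -> [obs_keys] and All_obs-{missing_obs} -> [obs_keys]
--     and All_obs -> [all_obs_keys]
--     """
--     combinations = key_map.copy()
--     if len(combinations) == 1:
--         return combinations
--
--     combinations["All_obs"] = list(itertools.chain.from_iterable(key_map.values()))
--
--     if len(combinations) == 3:
--         return combinations
--
--     for subset in itertools.combinations(key_map.keys(), len(key_map.keys()) - 1):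
--         obs_group = list(
--             itertools.chain.from_iterable([key_map[key] for key in subset])
--         )
--         missing_obs = [x for x in key_map if x not in set(subset)]
--         assert len(missing_obs) == 1
--         name = f"All_obs-{missing_obs[0]}"
--         combinations[name.replace(":", "_")] = obs_group
--
--     return combinations
-- ===== SOURCE B (Python) =====
-- def make_obs_groups(key_map):
--     """Create a mapping of observation groups, the names will be:
--     data_key -> [obs_keys] and All_obs-{missing_obs} -> [obs_keys]
--     and All_obs -> [all_obs_keys]
--     """
--     combinations = key_map.copy()
--     if len(combinations) == 1:
--         return combinations
--
--     # staged passes: prefix and suffix concatenations of the value lists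
--     items = list(key_map.items())
--     n = len(items)
--     pref = [[]]
--     for _, vals in items:
--         pref.append(pref[-1] + vals)
--     suf = [[] for _ in range(n + 1)]
--     for i in range(n - 1, -1, -1):
--         suf[i] = items[i][1] + suf[i + 1]
--
--     combinations["All_obs"] = pref[n]
--     if len(combinations) == 3:
--         return combinations
--
--     # group missing key i is pref[i] + suf[i+1]; A emits them last key first
--     for i in range(n - 1, -1, -1):
--         name = f"All_obs-{items[i][0]}"
--         combinations[name.replace(":", "_")] = pref[i] + suf[i + 1]
--     return combinations
-- ===== Notes on version B (the rewrite author's own statement) =====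
-- stated objective: faster
-- what changed: B replaces itertools.combinations plus a per-subset chain and set-difference search by two staged passes building prefix and suffix concatenations of the value lists, then reads each leave-one-out group off as pref[i] + suf[i+1].
import Mathlib
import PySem

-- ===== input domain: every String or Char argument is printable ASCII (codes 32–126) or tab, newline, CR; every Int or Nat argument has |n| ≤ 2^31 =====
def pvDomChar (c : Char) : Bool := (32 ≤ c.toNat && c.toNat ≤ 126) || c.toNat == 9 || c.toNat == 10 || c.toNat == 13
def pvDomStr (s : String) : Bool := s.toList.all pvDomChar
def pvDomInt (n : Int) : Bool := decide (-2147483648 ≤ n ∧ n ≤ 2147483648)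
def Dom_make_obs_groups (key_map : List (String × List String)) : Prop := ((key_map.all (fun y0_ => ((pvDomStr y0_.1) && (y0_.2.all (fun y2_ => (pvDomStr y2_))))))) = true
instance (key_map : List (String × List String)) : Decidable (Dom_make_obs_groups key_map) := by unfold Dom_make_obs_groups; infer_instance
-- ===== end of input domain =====

-- B replaces A's itertools.combinations + set-difference search by two staged passes that
-- build prefix and suffix concatenations of the value lists; each leave-one-out group is pref[i] ++ suf[i+1].


-- ===== PORT A =====
-- itertools.combinations(xs, k), in itertools' order
def pvCombos (k : Nat) (xs : List String) : List (List String) :=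
  match k, xs with
  | 0, _ => [[]]
  | _ + 1, [] => []
  | k + 1, x :: rest => ((pvCombos k rest).map (fun c => x :: c)) ++ pvCombos (k + 1) rest

def make_obs_groups (key_map : List (String × List String)) : List (String × List String) :=
  let combinations : PySem.Dict String (List String) := PySem.Dict.mk key_map
  if combinations.size == 1 then combinations.items
  else
    let combinations := combinations.insert "All_obs" (key_map.map Prod.snd).flatten
    if combinations.size == 3 then combinations.items
    else
      -- key_map[key]: the key is always present, so getD with default [] is exact
      ((pvCombos ((key_map.map Prod.fst).length - 1) (key_map.map Prod.fst)).foldl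
        (fun acc subset =>
          let obs_group := (subset.map (fun key => (PySem.Dict.mk key_map).getD key [])).flatten
          let missing_obs := (key_map.map Prod.fst).filter (fun x => !(subset.contains x))
          -- missing_obs[0]: under Pre_ the assert guarantees length 1, so headD is exact
          let name := "All_obs-" ++ missing_obs.headD ""
          acc.insert (PySem.Str.replace name ":" "_") obs_group)
        combinations).items

-- ===== PORT B =====
-- pref list of Source B: [pref0, pref0++v0, pref0++v0++v1, …] (length n+1)
def pvPrefs (cur : List String) : List (String × List String) → List (List String)
  | [] => [cur]
  | kv :: rest => cur :: pvPrefs (cur ++ kv.2) rest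

-- suf array of Source B, built back-to-front: suf[i] = v_i ++ suf[i+1] (length n+1)
def pvSufs : List (String × List String) → List (List String)
  | [] => [[]]
  | kv :: rest => (kv.2 ++ (pvSufs rest).headD []) :: pvSufs rest

def make_obs_groups_alt (key_map : List (String × List String)) : List (String × List String) :=
  let combinations : PySem.Dict String (List String) := PySem.Dict.mk key_map
  if combinations.size == 1 then combinations.items
  else
    let items := key_map
    let n := items.length
    let pref := pvPrefs [] items
    let suf := pvSufs items
    let combinations := combinations.insert "All_obs" (pref.getD n [])
    if combinations.size == 3 then combinations.items
    else
      (((List.range n).reverse).foldl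
        (fun acc i =>
          let name := "All_obs-" ++ (items.getD i ("", [])).1
          acc.insert (PySem.Str.replace name ":" "_") (pref.getD i [] ++ suf.getD (i + 1) []))
        combinations).items

-- ===== PRECONDITION & SPEC =====
-- Pre_ excludes the empty dict, where A raises ValueError (combinations(keys, -1)), and
-- association lists with duplicate keys, which cannot arise from a Python dict argument
-- (and on which A's `assert len(missing_obs) == 1` raises AssertionError once the loop runs).
def Pre_make_obs_groups (key_map : List (String × List String)) : Prop :=
  key_map ≠ [] ∧ (key_map.map Prod.fst).Nodup
instance (key_map : List (String × List String)) : Decidable (Pre_make_obs_groups key_map) := by unfold Pre_make_obs_groups; infer_instance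

def pvWitness_make_obs_groups : (List (String × List String)) :=
  [("a", ["x"]), ("b", ["y"]), ("c:1", ["z", "w"])]

def Spec_make_obs_groups (key_map : List (String × List String)) (out : List (String × List String)) : Prop := out = make_obs_groups_alt key_map
instance (key_map : List (String × List String)) (out : List (String × List String)) : Decidable (Spec_make_obs_groups key_map out) := by unfold Spec_make_obs_groups; infer_instance

-- ===== CLAIM (what is proved, stated in full; the proofs are below) =====
def Claim_equal_make_obs_groups : Prop := ∀ (key_map : List (String × List String)), Dom_make_obs_groups key_map → Pre_make_obs_groups key_map → Spec_make_obs_groups key_map (make_obs_groups key_map)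

-- ===== LEMMAS AND PROOFS =====
theorem pvCombos_gt (xs : List String) : ∀ k, xs.length < k → pvCombos k xs = [] := by
  induction xs with
  | nil => intro k hk; cases k with
    | zero => omega
    | succ k => rfl
  | cons x rest ih =>
    intro k hk
    cases k with
    | zero => omega
    | succ k =>
      show ((pvCombos k rest).map (fun c => x :: c)) ++ pvCombos (k + 1) rest = []
      rw [ih k (by simpa using hk), ih (k + 1) (by simp at hk; omega)]
      rfl

theorem pvCombos_full (l : List String) : pvCombos l.length l = [l] := by
  induction l with
  | nil => rfl
  | cons x xs ih =>
    show ((pvCombos xs.length xs).map (fun c => x :: c)) ++ pvCombos (xs.length + 1) xs = [x :: xs]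
    rw [ih]
    simp [pvCombos_gt xs (xs.length + 1) (Nat.lt_succ_self _)]

theorem pvCombos_pred (l : List String) (h : l ≠ []) :
    pvCombos (l.length - 1) l = ((List.range l.length).reverse).map (fun i => l.eraseIdx i) := by
  induction l with
  | nil => simp at h
  | cons x xs ih =>
    cases xs with
    | nil => rfl
    | cons y ys =>
      show ((pvCombos ((y :: ys).length - 1) (y :: ys)).map (fun c => x :: c))
            ++ pvCombos (y :: ys).length (y :: ys)
          = _
      rw [ih (by simp), pvCombos_full]
      rw [show (x :: y :: ys).length = (y :: ys).length + 1 from rfl, List.range_succ_eq_map]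
      simp [List.map_map, Function.comp_def, List.eraseIdx_cons_succ]

theorem pvMissingFilter (keys : List String) : ∀ i (h : i < keys.length), keys.Nodup →
    keys.filter (fun x => !((keys.eraseIdx i).contains x)) = [keys[i]'h] := by
  induction keys with
  | nil => intro i h; exact absurd h (by simp)
  | cons k rest ih =>
    intro i h hnd
    simp only [List.nodup_cons] at hnd
    cases i with
    | zero =>
      show List.filter (fun x => !(rest.contains x)) (k :: rest) = [k]
      rw [List.filter_cons_of_pos (by simpa using hnd.1)]
      rw [List.filter_eq_nil_iff.mpr]
      intro x hx
      simpa using hx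
    | succ i =>
      have hi : i < rest.length := by simpa using h
      show List.filter (fun x => !((k :: rest.eraseIdx i).contains x)) (k :: rest)
          = [rest[i]'hi]
      rw [List.filter_cons_of_neg (by simp)]
      rw [List.filter_congr (q := fun x => !((rest.eraseIdx i).contains x)), ih i hi hnd.2]
      intro x hx
      have hxk : x ≠ k := fun e => hnd.1 (e ▸ hx)
      simp [hxk]

theorem pvGetD_mem (l : List (String × List String)) (kv : String × List String)
    (hm : kv ∈ l) (hnd : (l.map Prod.fst).Nodup) :
    (PySem.Dict.mk l).getD kv.1 [] = kv.2 :=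
  PySem.Dict.getD_of_mem_items (d := PySem.Dict.mk l) (k := kv.1) (v := kv.2)
    (by exact hm) (by simpa using hnd) []

theorem pvPrefs_getD (l : List (String × List String)) : ∀ (cur : List String) i, i ≤ l.length →
    (pvPrefs cur l).getD i [] = cur ++ ((l.take i).map Prod.snd).flatten := by
  induction l with
  | nil =>
    intro cur i hi
    have h0 : i = 0 := Nat.le_zero.mp hi
    subst h0
    simp [pvPrefs]
  | cons kv rest ih =>
    intro cur i hi
    cases i with
    | zero => simp [pvPrefs]
    | succ i =>
      show (pvPrefs (cur ++ kv.2) rest).getD i [] = _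
      rw [ih (cur ++ kv.2) i (by simpa using hi)]
      simp

theorem pvSufs_len (l : List (String × List String)) : (pvSufs l).length = l.length + 1 := by
  induction l with
  | nil => rfl
  | cons kv rest ih => simp [pvSufs, ih]

theorem pvSufs_getD (l : List (String × List String)) : ∀ i, i ≤ l.length →
    (pvSufs l).getD i [] = ((l.drop i).map Prod.snd).flatten := by
  induction l with
  | nil =>
    intro i hi
    have h0 : i = 0 := Nat.le_zero.mp hi
    subst h0
    simp [pvSufs]
  | cons kv rest ih =>
    intro i hi
    cases i with
    | zero =>
      show kv.2 ++ (pvSufs rest).headD [] = _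
      have : (pvSufs rest).headD [] = (pvSufs rest).getD 0 [] := by
        cases h : pvSufs rest with
        | nil => have := pvSufs_len rest; simp [h] at this
        | cons a t => simp
      rw [this, ih 0 (Nat.zero_le _)]
      simp
    | succ i =>
      show (pvSufs rest).getD i [] = _
      rw [ih i (by simpa using hi)]
      simp

-- ===== VERDICT (by name: the statement is the Claim_ definition above) =====
theorem make_obs_groups_spec : Claim_equal_make_obs_groups := by
  intro key_map _ hpre
  unfold Spec_make_obs_groups make_obs_groups make_obs_groups_alt
  obtain ⟨hne, hnd⟩ := hpre
  simp only []
  have hAll : (pvPrefs [] key_map).getD key_map.length []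
      = (key_map.map Prod.snd).flatten := by
    rw [pvPrefs_getD key_map [] key_map.length (le_refl _)]
    simp
  rw [hAll]
  split_ifs with h1 h2
  · rfl
  · rfl
  · congr 1
    have hkne : (key_map.map Prod.fst) ≠ [] := by simpa using hne
    rw [pvCombos_pred _ hkne]
    rw [List.foldl_map]
    have hlen : (key_map.map Prod.fst).length = key_map.length := by simp
    rw [hlen]
    apply PySem.List.foldl_congr_mem
    intro acc i hi
    have hi' : i < key_map.length := by
      simp only [List.mem_reverse, List.mem_range] at hi
      exact hi
    have hik : i < (key_map.map Prod.fst).length := by simpa using hi'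
    rw [pvMissingFilter _ i hik hnd]
    have hobsA : ((key_map.map Prod.fst).eraseIdx i).map
        (fun key => (PySem.Dict.mk key_map).getD key []) = (key_map.eraseIdx i).map Prod.snd := by
      rw [List.eraseIdx_map, List.map_map]
      apply List.map_congr_left
      intro kv hkv
      exact pvGetD_mem key_map kv (List.mem_of_mem_eraseIdx hkv) hnd
    have hkey : (key_map.map Prod.fst)[i]'hik = (key_map.getD i ("", [])).1 := by
      rw [List.getD_eq_getElem _ _ hi']
      simp
    have hval : (pvPrefs [] key_map).getD i [] ++ (pvSufs key_map).getD (i + 1) []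
        = ((key_map.eraseIdx i).map Prod.snd).flatten := by
      rw [pvPrefs_getD key_map [] i (le_of_lt hi'), pvSufs_getD key_map (i + 1) hi',
        List.eraseIdx_eq_take_drop_succ]
      simp
    simp only [List.headD_cons, hobsA, hkey, hval]
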